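-- pv_equiv track=rewrite | github.com/fcontr1975/Blender-Flightgear-BTG-Import-Export | src/fg_btg_btgio.py | _max_group_size_by_material
-- ===== SOURCE A (Python) =====
-- def _max_group_size_by_material(face_materials):
--     if not face_materials:
--         return 0
--
--     grouped_counts = {}
--     for material_name in face_materials:
--         key = material_name or ""
--         grouped_counts[key] = grouped_counts.get(key, 0) + 1
--     return max(grouped_counts.values())
-- ===== SOURCE B (Python) =====
-- def _max_group_size_by_material(face_materials):
--     keys = [m or "" for m in face_materials]
--     best = 0
--     while keys:
--         k = keys[0]
--         rest = [x for x in keys if x != k]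
--         best = max(best, len(keys) - len(rest))
--         keys = rest
--     return best
-- ===== Notes on version B (the rewrite author's own statement) =====
-- stated objective: alternative
-- what changed: Replaces A's dict-of-counts plus max-of-values with a partition sweep: repeatedly take the first normalized key, measure its group size as the length drop after filtering it out, and recurse on the remainder keeping the running maximum.
import Mathlib
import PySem

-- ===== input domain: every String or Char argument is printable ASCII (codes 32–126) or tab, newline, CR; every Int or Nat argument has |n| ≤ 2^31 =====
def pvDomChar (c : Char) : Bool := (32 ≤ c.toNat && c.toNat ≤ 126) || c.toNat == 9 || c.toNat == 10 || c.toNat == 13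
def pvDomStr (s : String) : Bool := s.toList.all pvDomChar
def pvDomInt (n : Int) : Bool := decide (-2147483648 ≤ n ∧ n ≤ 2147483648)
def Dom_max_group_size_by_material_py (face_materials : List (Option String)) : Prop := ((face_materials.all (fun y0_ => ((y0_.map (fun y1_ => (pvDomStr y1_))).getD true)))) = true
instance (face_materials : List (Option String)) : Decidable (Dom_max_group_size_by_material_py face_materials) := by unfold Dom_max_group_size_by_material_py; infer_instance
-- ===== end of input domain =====

-- B replaces A's hash-bucket counting with a partition sweep (take the first key,
-- count its occurrences by a length difference, recurse on the remainder);
-- objective: alternative algorithm of similar cost, no speed claim.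

-- ===== PORT A =====
-- A: dict of counts keyed by (material_name or ""), then max of the values.
def max_group_size_by_material_py (face_materials : List (Option String)) : Int :=
  if face_materials = [] then 0
  else
    let grouped_counts : PySem.Dict String Int :=
      face_materials.foldl
        (fun grouped_counts material_name =>
          let key := material_name.getD ""   -- material_name or "" (None and "" both give "")
          grouped_counts.insert key (grouped_counts.getD key 0 + 1))
        PySem.Dict.empty
    match PySem.List.max? grouped_counts.values (fun v => v) with
    | some m => m
    | none => 0   -- unreachable: the dict is nonempty here

-- ===== PORT B =====
-- B's while loop: pick the first key, drop all its occurrences, record the group size.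
def pvAltRun (keys : List String) (best : Int) : Int :=
  match keys with
  | [] => best
  | k :: t =>
      let rest := (k :: t).filter (fun x => x ≠ k)
      pvAltRun rest (max best (((k :: t).length : Int) - (rest.length : Int)))
  termination_by keys.length
  decreasing_by
    simp only [List.filter_cons]
    have : (decide ¬k = k) = false := by simp
    rw [this]
    simpa using Nat.lt_succ_of_le (List.length_filter_le _ t)

def max_group_size_by_material_py_alt (face_materials : List (Option String)) : Int :=
  pvAltRun (face_materials.map (fun m => m.getD "")) 0

-- ===== PRECONDITION & SPEC =====
def Spec_max_group_size_by_material_py (face_materials : List (Option String)) (out : Int) : Prop := out = max_group_size_by_material_py_alt face_materials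
instance (face_materials : List (Option String)) (out : Int) : Decidable (Spec_max_group_size_by_material_py face_materials out) := by unfold Spec_max_group_size_by_material_py; infer_instance

-- ===== CLAIM (what is proved, stated in full; the proofs are below) =====
def Claim_equal_max_group_size_by_material_py : Prop := ∀ (face_materials : List (Option String)), Dom_max_group_size_by_material_py face_materials → Spec_max_group_size_by_material_py face_materials (max_group_size_by_material_py face_materials)

-- ===== LEMMAS AND PROOFS =====

theorem pv_foldl_max_le (l : List Int) (b c : Int) (hb : b ≤ c)
    (hl : ∀ x ∈ l, x ≤ c) : List.foldl max b l ≤ c := by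
  induction l generalizing b with
  | nil => simpa using hb
  | cons x t ih =>
      exact ih (max b x) (max_le hb (hl x (List.mem_cons_self))) (fun y hy => hl y (List.mem_cons_of_mem _ hy))

theorem pv_le_foldl_max_init (l : List Int) (b : Int) : b ≤ List.foldl max b l := by
  induction l generalizing b with
  | nil => simp
  | cons x t ih => exact le_trans (le_max_left b x) (ih (max b x))

theorem pv_le_foldl_max_mem (l : List Int) (b x : Int) (hx : x ∈ l) : x ≤ List.foldl max b l := by
  induction l generalizing b with
  | nil => cases hx
  | cons y t ih =>
      rcases List.mem_cons.mp hx with h | h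
      · subst h; exact le_trans (le_max_right b x) (pv_le_foldl_max_init t (max b x))
      · exact ih (max b y) h

theorem pv_foldl_max_congr_mem (b : Int) (l₁ l₂ : List Int)
    (h : ∀ x, x ∈ l₁ ↔ x ∈ l₂) : List.foldl max b l₁ = List.foldl max b l₂ := by
  refine le_antisymm ?_ ?_
  · exact pv_foldl_max_le l₁ b _ (pv_le_foldl_max_init l₂ b)
      (fun x hx => pv_le_foldl_max_mem l₂ b x ((h x).mp hx))
  · exact pv_foldl_max_le l₂ b _ (pv_le_foldl_max_init l₁ b)
      (fun x hx => pv_le_foldl_max_mem l₁ b x ((h x).mpr hx))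

theorem pv_filter_length_count (t : List String) (k : String) :
    (t.filter (fun x => x ≠ k)).length + t.count k = t.length := by
  induction t with
  | nil => simp
  | cons y s ih =>
      simp only [ne_eq, decide_not] at ih ⊢
      by_cases h : y = k
      · simp [h]
        omega
      · simp [h]
        omega

theorem pv_count_filter_ne (t : List String) (k k' : String) (h : k' ≠ k) :
    (t.filter (fun x => x ≠ k)).count k' = t.count k' :=
  List.count_filter (by simpa using h)

-- pvAltRun computes: max over the distinct keys of their multiplicity, folded onto best.
theorem pv_altRun_eq (keys : List String) (best : Int) :
    pvAltRun keys best =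
      List.foldl max best ((PySem.Set.ofList keys).map (fun k => (keys.count k : Int))) := by
  induction keys, best using pvAltRun.induct with
  | case1 best => simp [pvAltRun, PySem.Set.ofList]
  | case2 best k t rest ih =>
      rw [pvAltRun]
      rw [ih]
      have hlen : (((k :: t).length : Int) - (rest.length : Int)) = ((k :: t).count k : Int) := by
        have h1 : rest = t.filter (fun x => x ≠ k) := by
          simp [rest]
        have h2 := pv_filter_length_count t k
        rw [h1, List.count_cons_self]
        simp only [List.length_cons]
        omega
      rw [hlen]
      have hstep : List.foldl max (max best ((k :: t).count k : Int))
            ((PySem.Set.ofList rest).map (fun k' => (rest.count k' : Int)))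
          = List.foldl max best
            ((((k :: t).count k : Int)) :: (PySem.Set.ofList rest).map (fun k' => (rest.count k' : Int))) := by
        simp
      rw [hstep]
      apply pv_foldl_max_congr_mem
      intro x
      have hrest : rest = t.filter (fun x => x ≠ k) := by simp [rest]
      constructor
      · intro hx
        rcases List.mem_cons.mp hx with h | h
        · exact List.mem_map.mpr ⟨k, (PySem.Set.mem_ofList _ _).mpr List.mem_cons_self, h.symm⟩
        · rcases List.mem_map.mp h with ⟨k', hk', hval⟩
          have hk'mem : k' ∈ rest := (PySem.Set.mem_ofList _ _).mp hk'
          have hk'ne : k' ≠ k := by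
            rw [hrest] at hk'mem
            simpa using (List.mem_filter.mp hk'mem).2
          refine List.mem_map.mpr ⟨k', (PySem.Set.mem_ofList _ _).mpr ?_, ?_⟩
          · exact List.mem_cons_of_mem _ (by
              have := (List.mem_filter.mp (hrest ▸ hk'mem)).1
              exact this)
          · rw [← hval]
            rw [hrest, pv_count_filter_ne t k k' hk'ne]
            simp only [List.count_cons]
            simp
            exact fun e => hk'ne e.symm
      · intro hx
        rcases List.mem_map.mp hx with ⟨k', hk', hval⟩
        have hk'mem : k' ∈ (k :: t) := (PySem.Set.mem_ofList _ _).mp hk'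
        by_cases hk'k : k' = k
        · subst hk'k
          exact List.mem_cons.mpr (Or.inl hval.symm)
        · have hk't : k' ∈ t := by
            rcases List.mem_cons.mp hk'mem with h | h
            · exact absurd h hk'k
            · exact h
          refine List.mem_cons.mpr (Or.inr (List.mem_map.mpr ⟨k', (PySem.Set.mem_ofList _ _).mpr ?_, ?_⟩))
          · rw [hrest]
            exact List.mem_filter.mpr ⟨hk't, by simpa using hk'k⟩
          · rw [← hval]
            rw [hrest, pv_count_filter_ne t k k' hk'k]
            simp only [List.count_cons]
            simp
            exact fun e => hk'k e.symm

-- folding PySem.Set.add only appends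
theorem pv_foldl_add_append (l : List String) (s : PySem.Set String) :
    ∃ r, List.foldl PySem.Set.add s l = s ++ r := by
  induction l generalizing s with
  | nil => exact ⟨[], by simp⟩
  | cons x t ih =>
      by_cases h : s.contains x
      · have h' : x ∈ s := by simpa using h
        have hadd : PySem.Set.add s x = s := by simp [PySem.Set.add, h']
        rcases ih s with ⟨r, hr⟩
        exact ⟨r, by simp [List.foldl_cons, hadd, hr]⟩
      · have h' : x ∉ s := by simpa using h
        have hadd : PySem.Set.add s x = s ++ [x] := by simp [PySem.Set.add, h']
        rcases ih (s ++ [x]) with ⟨r, hr⟩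
        exact ⟨x :: r, by simp [List.foldl_cons, hadd, hr]⟩

theorem pv_ofList_cons (a : String) (l : List String) :
    ∃ r, PySem.Set.ofList (a :: l) = a :: r := by
  rcases pv_foldl_add_append l [a] with ⟨r, hr⟩
  refine ⟨r, ?_⟩
  rw [PySem.Set.ofList_eq_foldl]
  have hadd : PySem.Set.add ([] : PySem.Set String) a = [a] := by
    simp [PySem.Set.add]
  simpa [List.foldl_cons, hadd] using hr

-- ===== VERDICT (by name: the statement is the Claim_ definition above) =====
theorem max_group_size_by_material_py_spec : Claim_equal_max_group_size_by_material_py := by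
  intro fm _
  unfold Spec_max_group_size_by_material_py
  unfold max_group_size_by_material_py max_group_size_by_material_py_alt
  cases fm with
  | nil => simp [pvAltRun]
  | cons m fms =>
      simp only [if_neg (List.cons_ne_nil m fms)]
      set keys : List String := (m :: fms).map (fun x => x.getD "") with hkeys
      have hfold : (m :: fms).foldl
          (fun (d : PySem.Dict String Int) material_name =>
            let key := material_name.getD ""
            d.insert key (d.getD key 0 + 1)) PySem.Dict.empty
          = PySem.Dict.counter keys := by
        rw [hkeys, ← PySem.Dict.foldl_insert_getD_add_one_eq_counter, List.foldl_map]
      rw [hfold]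
      have hvals : (PySem.Dict.counter keys).values
          = (PySem.Set.ofList keys).map (fun k => (keys.count k : Int)) := by
        simp [PySem.Dict.values, PySem.Dict.items_counter, List.map_map, Function.comp]
      rw [hvals]
      have hk : keys = (m.getD "") :: fms.map (fun x => x.getD "") := by simp [hkeys]
      rcases pv_ofList_cons (m.getD "") (fms.map (fun x => x.getD "")) with ⟨r, hr⟩
      rw [pv_altRun_eq]
      rw [hk, hr]
      simp only [List.map_cons]
      rw [PySem.List.max?_id_cons]
      have hpos : (0 : Int) ≤ (((m.getD "" : String) :: fms.map (fun x => x.getD "")).count (m.getD "") : Int) := by positivity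
      simp only [List.foldl_cons]
      rw [max_eq_right hpos]
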